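-- pv_equiv track=rewrite | github.com/ilmari99/algorithms | foobar42.py | cal_new_direction
-- ===== SOURCE A (Python) =====
-- def cal_new_direction(wall_hits,direction):
--     """Calculates the new direction based on the wall hits.
--     If the beam hits the bounds of the corresponding coordinate, then the direction is reversed in the corresponding direction element.
--     """
--     new_direction = direction.copy()
--     for i,w in enumerate(wall_hits):
--         if w:
--             # If hits the bottom or top walls, the y direction is reversed
--             if i in [0,2]:
--                 new_direction[1] = -new_direction[1]
--             else:
--                 new_direction[0] = -new_direction[0]
--     return new_direction
-- ===== SOURCE B (Python) =====
-- def cal_new_direction(wall_hits, direction):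
--     """Parity-based: count hits in the y-group (indices 0 and 2) and in the
--     x-group (all other indices), then apply at most one negation per axis."""
--     ys = sum(1 for i in (0, 2) if i < len(wall_hits) and wall_hits[i])
--     flips = sum(map(bool, wall_hits))
--     new_direction = list(direction)
--     if ys % 2:
--         new_direction[1] = -new_direction[1]
--     if (flips - ys) % 2:
--         new_direction[0] = -new_direction[0]
--     return new_direction
-- ===== Notes on version B (the rewrite author's own statement) =====
-- stated objective: simpler
-- what changed: Instead of toggling the direction entries in place on every wall hit, B counts the hits in the y-group (indices 0 and 2) and the x-group (all other indices) and negates each axis at most once according to the parity of its count.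
import Mathlib
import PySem

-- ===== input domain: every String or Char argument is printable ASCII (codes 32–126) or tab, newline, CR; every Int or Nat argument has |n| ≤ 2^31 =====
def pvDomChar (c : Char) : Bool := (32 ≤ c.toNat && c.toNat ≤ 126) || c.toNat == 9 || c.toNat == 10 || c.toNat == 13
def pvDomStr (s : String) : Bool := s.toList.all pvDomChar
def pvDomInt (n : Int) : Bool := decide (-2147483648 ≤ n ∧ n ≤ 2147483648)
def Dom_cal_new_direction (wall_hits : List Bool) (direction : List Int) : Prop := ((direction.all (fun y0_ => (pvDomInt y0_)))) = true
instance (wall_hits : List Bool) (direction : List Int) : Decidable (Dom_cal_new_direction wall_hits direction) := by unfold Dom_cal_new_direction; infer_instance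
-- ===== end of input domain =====

-- B replaces A's per-hit in-place toggling by two hit-count parities (y-group = indices 0,2; x-group = the rest) applied once per axis: simpler, at most one negation each.


-- ===== PORT A =====
-- literal port of A: for i,w in enumerate(wall_hits): if w: negate new_direction[1] (i in [0,2]) else new_direction[0]
def cal_new_direction (wall_hits : List Bool) (direction : List Int) : List Int :=
  (PySem.List.enumerate wall_hits 0).foldl
    (fun nd iw =>
      if iw.2 then
        if iw.1 = 0 ∨ iw.1 = 2 then
          PySem.List.pySetD nd 1 (-(PySem.List.pyGetD nd 1 0))
        else
          PySem.List.pySetD nd 0 (-(PySem.List.pyGetD nd 0 0))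
      else nd)
    direction

-- ===== PORT B =====
-- literal port of Source B: ys = hits at indices 0,2; flips = all hits; negate entry 1 once if ys is odd, entry 0 once if (flips - ys) is odd
def cal_new_direction_alt (wall_hits : List Bool) (direction : List Int) : List Int :=
  let ys : Nat :=
    (if 0 < wall_hits.length ∧ wall_hits.getD 0 false = true then 1 else 0) +
    (if 2 < wall_hits.length ∧ wall_hits.getD 2 false = true then 1 else 0)
  let flips : Nat := wall_hits.countP (fun b => b)
  let nd1 : List Int :=
    if ys % 2 = 1 then PySem.List.pySetD direction 1 (-(PySem.List.pyGetD direction 1 0)) else direction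
  if (flips - ys) % 2 = 1 then PySem.List.pySetD nd1 0 (-(PySem.List.pyGetD nd1 0 0)) else nd1

-- ===== PRECONDITION & SPEC =====
-- Pre_ excludes exactly the inputs on which Python A raises IndexError: a hit at index 0 or 2 with len(direction) < 2, or a hit at any other index (1 or ≥ 3) with direction empty.
def Pre_cal_new_direction (wall_hits : List Bool) (direction : List Int) : Prop :=
  ((wall_hits.getD 0 false = true ∨ wall_hits.getD 2 false = true) → 2 ≤ direction.length) ∧
  ((wall_hits.getD 1 false = true ∨ (wall_hits.drop 3).any id = true) → 1 ≤ direction.length)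
instance (wall_hits : List Bool) (direction : List Int) : Decidable (Pre_cal_new_direction wall_hits direction) := by unfold Pre_cal_new_direction; infer_instance

def pvWitness_cal_new_direction : List Bool × List Int := ([true, true, false, true], [3, -4])

def Spec_cal_new_direction (wall_hits : List Bool) (direction : List Int) (out : List Int) : Prop := out = cal_new_direction_alt wall_hits direction
instance (wall_hits : List Bool) (direction : List Int) (out : List Int) : Decidable (Spec_cal_new_direction wall_hits direction out) := by unfold Spec_cal_new_direction; infer_instance

-- ===== CLAIM (what is proved, stated in full; the proofs are below) =====
def Claim_equal_cal_new_direction : Prop := ∀ (wall_hits : List Bool) (direction : List Int), Dom_cal_new_direction wall_hits direction → Pre_cal_new_direction wall_hits direction → Spec_cal_new_direction wall_hits direction (cal_new_direction wall_hits direction)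

-- ===== LEMMAS AND PROOFS =====

-- negate entry 1 / entry 0 (a no-op out of range, matching pySetD)
def pvNeg1 (d : List Int) : List Int := PySem.List.pySetD d 1 (-(PySem.List.pyGetD d 1 0))
def pvNeg0 (d : List Int) : List Int := PySem.List.pySetD d 0 (-(PySem.List.pyGetD d 0 0))

theorem pvNeg1_nil : pvNeg1 [] = [] := by simp [pvNeg1, pysem]
theorem pvNeg1_one (a : Int) : pvNeg1 [a] = [a] := by simp [pvNeg1, pysem]
theorem pvNeg1_cons (a b : Int) (r : List Int) : pvNeg1 (a :: b :: r) = a :: -b :: r := by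
  simp [pvNeg1, pysem]
theorem pvNeg0_nil : pvNeg0 [] = [] := by simp [pvNeg0, pysem]
theorem pvNeg0_cons (a : Int) (r : List Int) : pvNeg0 (a :: r) = -a :: r := by
  simp [pvNeg0, pysem]

theorem pvNeg1_invol (d : List Int) : pvNeg1 (pvNeg1 d) = d := by
  rcases d with _ | ⟨a, _ | ⟨b, r⟩⟩ <;> simp [pvNeg1_nil, pvNeg1_one, pvNeg1_cons]
theorem pvNeg0_invol (d : List Int) : pvNeg0 (pvNeg0 d) = d := by
  rcases d with _ | ⟨a, r⟩ <;> simp [pvNeg0_nil, pvNeg0_cons]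
theorem pvNeg_comm (d : List Int) : pvNeg0 (pvNeg1 d) = pvNeg1 (pvNeg0 d) := by
  rcases d with _ | ⟨a, _ | ⟨b, r⟩⟩ <;>
    simp [pvNeg0_nil, pvNeg0_cons, pvNeg1_nil, pvNeg1_one, pvNeg1_cons]

-- apply the two parity flips: entry 1 first (if fy), then entry 0 (if fx)
def pvApply (fy fx : Bool) (d : List Int) : List Int :=
  (if fx then pvNeg0 else id) ((if fy then pvNeg1 else id) d)

theorem pvApply_neg1 (fy fx : Bool) (d : List Int) :
    pvApply fy fx (pvNeg1 d) = pvApply (!fy) fx d := by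
  cases fy <;> simp [pvApply, pvNeg1_invol]
theorem pvApply_neg0 (fy fx : Bool) (d : List Int) :
    pvApply fy fx (pvNeg0 d) = pvApply fy (!fx) d := by
  cases fy <;> cases fx <;> simp [pvApply, pvNeg0_invol, pvNeg_comm]

-- parities accumulated by A's loop from start index s on
def pvPY (s : Int) : List Bool → Bool
  | [] => false
  | w :: ws => ((w && decide (s = 0 ∨ s = 2)) != pvPY (s + 1) ws)
def pvPX (s : Int) : List Bool → Bool
  | [] => false
  | w :: ws => ((w && !decide (s = 0 ∨ s = 2)) != pvPX (s + 1) ws)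

-- A's loop equals applying the two parities
theorem pvFold_eq_apply (ws : List Bool) (s : Int) (d : List Int) :
    (PySem.List.enumerate ws s).foldl
      (fun nd iw =>
        if iw.2 then
          if iw.1 = 0 ∨ iw.1 = 2 then
            PySem.List.pySetD nd 1 (-(PySem.List.pyGetD nd 1 0))
          else
            PySem.List.pySetD nd 0 (-(PySem.List.pyGetD nd 0 0))
        else nd)
      d = pvApply (pvPY s ws) (pvPX s ws) d := by
  induction ws generalizing s d with
  | nil => simp [PySem.List.enumerate_nil, pvPY, pvPX, pvApply]
  | cons w ws ih =>
    rw [PySem.List.enumerate_cons, List.foldl_cons]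
    cases w with
    | false => rw [ih]; simp [pvPY, pvPX]
    | true =>
      by_cases hs : s = 0 ∨ s = 2
      · have h1 : pvPY s (true :: ws) = !pvPY (s + 1) ws := by simp [pvPY, hs]
        have h2 : pvPX s (true :: ws) = pvPX (s + 1) ws := by simp [pvPX, hs]
        rw [h1, h2, ih]
        simpa [hs, pvNeg1] using pvApply_neg1 (pvPY (s + 1) ws) (pvPX (s + 1) ws) d
      · have h1 : pvPY s (true :: ws) = pvPY (s + 1) ws := by simp [pvPY, hs]
        have h2 : pvPX s (true :: ws) = !pvPX (s + 1) ws := by simp [pvPX, hs]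
        rw [h1, h2, ih]
        simpa [hs, pvNeg0] using pvApply_neg0 (pvPY (s + 1) ws) (pvPX (s + 1) ws) d

-- B's y-group count, named for the proofs
def pvYs (ws : List Bool) : Nat :=
  (if 0 < ws.length ∧ ws.getD 0 false = true then 1 else 0) +
  (if 2 < ws.length ∧ ws.getD 2 false = true then 1 else 0)

-- B equals applying its two parity flags
theorem pvAlt_apply (ws : List Bool) (d : List Int) :
    cal_new_direction_alt ws d =
      pvApply (decide (pvYs ws % 2 = 1)) (decide ((ws.countP (fun b => b) - pvYs ws) % 2 = 1)) d := by
  by_cases h1 : pvYs ws % 2 = 1 <;> by_cases h2 : (ws.countP (fun b => b) - pvYs ws) % 2 = 1 <;>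
    simp [cal_new_direction_alt, pvYs, pvApply] at * <;> simp [h1, h2, pvNeg1, pvNeg0]

-- from index 3 on there is no y-group hit, and every hit is an x-group hit
theorem pvPY_ge3 (ws : List Bool) (s : Int) (h : 3 ≤ s) : pvPY s ws = false := by
  induction ws generalizing s with
  | nil => rfl
  | cons w ws ih =>
    have h0 : ¬ (s = 0 ∨ s = 2) := by omega
    simp [pvPY, h0, ih (s + 1) (by omega)]

theorem pvParity_succ (n : Nat) : decide ((n + 1) % 2 = 1) = !decide (n % 2 = 1) := by
  rcases Nat.mod_two_eq_zero_or_one n with h | h <;> simp [Nat.add_mod, h]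

theorem pvPX_ge3 (ws : List Bool) (s : Int) (h : 3 ≤ s) :
    pvPX s ws = decide (ws.countP (fun b => b) % 2 = 1) := by
  induction ws generalizing s with
  | nil => rfl
  | cons w ws ih =>
    have h0 : ¬ (s = 0 ∨ s = 2) := by omega
    cases w <;> simp [pvPX, h0, ih (s + 1) (by omega), pvParity_succ, Nat.add_mod]

-- B's flags coincide with A's accumulated parities
theorem pvFlagY (ws : List Bool) : decide (pvYs ws % 2 = 1) = pvPY 0 ws := by
  rcases ws with _ | ⟨a, _ | ⟨b, _ | ⟨c, rest⟩⟩⟩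
  · simp [pvYs, pvPY]
  · cases a <;> simp [pvYs, pvPY]
  · cases a <;> cases b <;> simp [pvYs, pvPY]
  · have hy := pvPY_ge3 rest 3 (by omega)
    cases a <;> cases b <;> cases c <;> simp [pvYs, pvPY, hy]

theorem pvFlagX (ws : List Bool) :
    decide ((ws.countP (fun b => b) - pvYs ws) % 2 = 1) = pvPX 0 ws := by
  rcases ws with _ | ⟨a, _ | ⟨b, _ | ⟨c, rest⟩⟩⟩
  · simp [pvYs, pvPX]
  · cases a <;> simp [pvYs, pvPX]
  · cases a <;> cases b <;> simp [pvYs, pvPX]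
  · have hx := pvPX_ge3 rest 3 (by omega)
    cases a <;> cases b <;> cases c <;>
      simp [pvYs, pvPX, hx, pvParity_succ]

-- ===== VERDICT (by name: the statement is the Claim_ definition above) =====
theorem cal_new_direction_spec : Claim_equal_cal_new_direction := by
  intro wall_hits direction _ _
  unfold Spec_cal_new_direction cal_new_direction
  rw [pvFold_eq_apply, pvAlt_apply, pvFlagY, pvFlagX]
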